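-- pv_equiv track=rewrite | github.com/jbsauvan/realistic-signaldriven-elinks | extract-mappings/common.py | rotate_to_sector0
-- ===== SOURCE A (Python) =====
-- def rotate_to_sector0(u, v):
--     sector = 0;
--     if u > 0 and v >= 0:
--         if v < u:
--             sector = 0
--         else:
--             sector = 1
--     elif u >= v and v < 0:
--         if u >= 0:
--             sector = 5;
--         else:
--             sector = 4;
--     else:
--         if v > 0:
--             sector = 2;
--         else:
--             sector = 3;
--
--     u0 = u
--     v0 = v
--     for rot in range(sector):
--         u_tmp = v0;
--         v_tmp = v0 - u0;
--         u0 = u_tmp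
--         v0 = v_tmp
--     return sector,u0,v0
-- ===== SOURCE B (Python) =====
-- def rotate_to_sector0(u, v):
--     if u > 0 and v >= 0:
--         sector = 0 if v < u else 1
--     elif u >= v and v < 0:
--         sector = 5 if u >= 0 else 4
--     else:
--         sector = 2 if v > 0 else 3
--     table = ((u, v), (v, v - u), (v - u, -u), (-u, -v), (-v, u - v), (u - v, u))
--     u0, v0 = table[sector]
--     return sector, u0, v0
-- ===== Notes on version B (the rewrite author's own statement) =====
-- stated objective: simpler
-- what changed: Replaces the sector-times rotation loop with a direct per-sector closed-form table of the rotation map, so no loop runs.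
import Mathlib
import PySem

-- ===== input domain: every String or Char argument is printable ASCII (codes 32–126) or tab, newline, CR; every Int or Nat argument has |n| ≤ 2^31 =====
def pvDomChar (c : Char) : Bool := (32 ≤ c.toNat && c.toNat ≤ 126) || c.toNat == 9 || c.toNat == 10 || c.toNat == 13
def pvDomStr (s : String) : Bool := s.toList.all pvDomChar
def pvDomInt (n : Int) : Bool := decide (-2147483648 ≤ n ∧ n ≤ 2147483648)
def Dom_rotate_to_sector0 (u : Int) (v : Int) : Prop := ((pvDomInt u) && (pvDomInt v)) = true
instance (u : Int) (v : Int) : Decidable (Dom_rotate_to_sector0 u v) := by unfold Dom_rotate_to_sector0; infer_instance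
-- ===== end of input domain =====

-- B replaces A's sector-times rotation loop by a per-sector closed-form table (simpler).

-- ===== PORT A =====
def rotate_to_sector0 (u : Int) (v : Int) : Int × Int × Int :=
  let sector : Int :=
    if u > 0 ∧ v ≥ 0 then
      (if v < u then 0 else 1)
    else if u ≥ v ∧ v < 0 then
      (if u ≥ 0 then 5 else 4)
    else
      (if v > 0 then 2 else 3)
  -- for rot in range(sector): (u0, v0) = (v0, v0 - u0)
  let p : Int × Int :=
    (PySem.List.pyRange 0 sector 1).foldl (fun st _ => (st.2, st.2 - st.1)) (u, v)
  (sector, p.1, p.2)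

-- ===== PORT B =====
def rotate_to_sector0_alt (u : Int) (v : Int) : Int × Int × Int :=
  let sector : Int :=
    if u > 0 ∧ v ≥ 0 then
      (if v < u then 0 else 1)
    else if u ≥ v ∧ v < 0 then
      (if u ≥ 0 then 5 else 4)
    else
      (if v > 0 then 2 else 3)
  let table : List (Int × Int) :=
    [(u, v), (v, v - u), (v - u, -u), (-u, -v), (-v, u - v), (u - v, u)]
  -- table[sector]: sector is always in 0..5, so the lookup never fails
  let p : Int × Int := (PySem.List.pyGet? table sector).getD (0, 0)
  (sector, p.1, p.2)

-- ===== PRECONDITION & SPEC =====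
def Spec_rotate_to_sector0 (u : Int) (v : Int) (out : Int × Int × Int) : Prop := out = rotate_to_sector0_alt u v
instance (u : Int) (v : Int) (out : Int × Int × Int) : Decidable (Spec_rotate_to_sector0 u v out) := by unfold Spec_rotate_to_sector0; infer_instance

-- ===== CLAIM (what is proved, stated in full; the proofs are below) =====
def Claim_equal_rotate_to_sector0 : Prop := ∀ (u : Int) (v : Int), Dom_rotate_to_sector0 u v → Spec_rotate_to_sector0 u v (rotate_to_sector0 u v)

-- ===== LEMMAS AND PROOFS =====

-- ===== VERDICT (by name: the statement is the Claim_ definition above) =====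
theorem rotate_to_sector0_spec : Claim_equal_rotate_to_sector0 := by
  intro u v _
  unfold Spec_rotate_to_sector0 rotate_to_sector0 rotate_to_sector0_alt
  split_ifs <;>
    simp [PySem.List.pyRange, PySem.List.pyGet?, PySem.List.pyIdx?, List.range_succ, List.foldl] <;> ring_nf <;> simp
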